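-- pv_equiv track=rewrite | github.com/coco-in-bluemoon/baekjoon-online-judge | 삼성 SW 역량 테스트 기출 문제/테트로미노.py | match_tetromino
-- ===== SOURCE A (Python) =====
-- def match_tetromino(board, shape):
--     N = len(board)
--     M = len(board[0])
--
--     R = len(shape)
--     C = len(shape[0])
--
--     if N < R:
--         return 0
--
--     summation = 0
--     for br in range(N-R+1):
--         for bc in range(M-C+1):
--             temp = 0
--             for r in range(R):
--                 for c in range(C):
--                     temp += (board[br+r][bc+c] * shape[r][c])
--             summation = max(summation, temp)
--
--     return summation
-- ===== SOURCE B (Python) =====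
-- def match_tetromino(board, shape):
--     N, M = len(board), len(board[0])
--     R, C = len(shape), len(shape[0])
--     H, W = N - R + 1, M - C + 1
--     if H <= 0 or W <= 0:
--         return 0
--     # placement-score table: score[br][bc] accumulates the dot product for
--     # placing the shape at (br, bc); filled shape-cell by shape-cell.
--     score = [[0] * W for _ in range(H)]
--     for r in range(R):
--         for c in range(C):
--             v = shape[r][c]
--             score = [[score[br][bc] + board[br + r][bc + c] * v
--                       for bc in range(W)]
--                      for br in range(H)]
--     return max(0, max(max(row) for row in score))
-- ===== Notes on version B (the rewrite author's own statement) =====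
-- stated objective: alternative
-- what changed: B inverts the loop nesting: instead of A's placement-major scan that recomputes each placement's dot product over the whole shape, B iterates over shape cells in the outer loops and accumulates each cell's contribution into a 2D placement-score table, finishing with max(0, table maximum).
import Mathlib
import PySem

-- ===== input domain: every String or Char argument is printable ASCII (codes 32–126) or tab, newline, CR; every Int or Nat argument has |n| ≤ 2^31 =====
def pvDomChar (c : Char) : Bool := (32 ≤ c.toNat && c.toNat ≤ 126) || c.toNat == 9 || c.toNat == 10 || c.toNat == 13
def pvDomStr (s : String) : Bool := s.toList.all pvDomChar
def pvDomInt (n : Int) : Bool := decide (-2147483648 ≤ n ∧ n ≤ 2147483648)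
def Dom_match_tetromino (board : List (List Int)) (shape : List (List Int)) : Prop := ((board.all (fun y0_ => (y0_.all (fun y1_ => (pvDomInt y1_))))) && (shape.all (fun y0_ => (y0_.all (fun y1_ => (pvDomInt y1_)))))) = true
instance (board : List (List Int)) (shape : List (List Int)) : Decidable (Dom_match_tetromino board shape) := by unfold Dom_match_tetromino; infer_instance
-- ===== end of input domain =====

-- B inverts the loop nesting: shape-cell-major accumulation into a placement-score table
-- instead of A's placement-major rescans of the shape; same maximum, return value only.

-- ===== PORT A =====
def match_tetromino (board : List (List Int)) (shape : List (List Int)) : Int :=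
  let N : Int := board.length
  let M : Int := (PySem.List.pyGetD board 0 []).length
  let R : Int := shape.length
  let C : Int := (PySem.List.pyGetD shape 0 []).length
  if N < R then 0
  else
    (PySem.List.pyRange 0 (N - R + 1) 1).foldl (fun summation br =>
      (PySem.List.pyRange 0 (M - C + 1) 1).foldl (fun summation bc =>
        let temp :=
          (PySem.List.pyRange 0 R 1).foldl (fun temp r =>
            (PySem.List.pyRange 0 C 1).foldl (fun temp c =>
              temp + PySem.List.pyGetD (PySem.List.pyGetD board (br + r) []) (bc + c) 0
                   * PySem.List.pyGetD (PySem.List.pyGetD shape r []) c 0) temp) 0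
        max summation temp) summation) 0

-- ===== PORT B =====
def match_tetromino_alt (board : List (List Int)) (shape : List (List Int)) : Int :=
  let N : Int := board.length
  let M : Int := (PySem.List.pyGetD board 0 []).length
  let R : Int := shape.length
  let C : Int := (PySem.List.pyGetD shape 0 []).length
  let H : Int := N - R + 1
  let W : Int := M - C + 1
  if H ≤ 0 || W ≤ 0 then 0
  else
    let score0 : List (List Int) :=
      (PySem.List.pyRange 0 H 1).map (fun _ => List.replicate W.toNat (0 : Int))
    let score : List (List Int) :=
      (PySem.List.pyRange 0 R 1).foldl (fun score r =>
        (PySem.List.pyRange 0 C 1).foldl (fun score c =>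
          let v := PySem.List.pyGetD (PySem.List.pyGetD shape r []) c 0
          (PySem.List.pyRange 0 H 1).map (fun br =>
            (PySem.List.pyRange 0 W 1).map (fun bc =>
              PySem.List.pyGetD (PySem.List.pyGetD score br []) bc 0
                + PySem.List.pyGetD (PySem.List.pyGetD board (br + r) []) (bc + c) 0 * v)))
          score) score0
    max 0 ((PySem.List.max?
      (score.map (fun row => (PySem.List.max? row (fun x => x)).getD 0))
      (fun x => x)).getD 0)

-- ===== PRECONDITION & SPEC =====
-- Pre_ is exactly A's no-raise domain: board and shape non-empty (board[0]/shape[0] are read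
-- unconditionally), and whenever the placement loops actually touch cells (shape fits: R ≤ N and
-- 1 ≤ C ≤ M) every board row must reach width M and every shape row width C.
def Pre_match_tetromino (board : List (List Int)) (shape : List (List Int)) : Prop :=
  board ≠ [] ∧ shape ≠ [] ∧
  ((shape.length ≤ board.length ∧ 1 ≤ shape.headI.length ∧
      shape.headI.length ≤ board.headI.length) →
    (∀ row ∈ board, board.headI.length ≤ row.length) ∧
    (∀ row ∈ shape, shape.headI.length ≤ row.length))
instance (board : List (List Int)) (shape : List (List Int)) : Decidable (Pre_match_tetromino board shape) := by unfold Pre_match_tetromino; infer_instance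

def pvWitness_match_tetromino : List (List Int) × List (List Int) :=
  ([[1, 2], [3, -4]], [[1, 0], [0, 1]])

def Spec_match_tetromino (board : List (List Int)) (shape : List (List Int)) (out : Int) : Prop := out = match_tetromino_alt board shape
instance (board : List (List Int)) (shape : List (List Int)) (out : Int) : Decidable (Spec_match_tetromino board shape out) := by unfold Spec_match_tetromino; infer_instance

-- ===== CLAIM (what is proved, stated in full; proofs are below) =====
def Claim_equal_match_tetromino : Prop := ∀ (board : List (List Int)) (shape : List (List Int)), Dom_match_tetromino board shape → Pre_match_tetromino board shape → Spec_match_tetromino board shape (match_tetromino board shape)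

-- ===== LEMMAS AND PROOFS =====

-- The placement-score table as a function of the per-placement score g.
def pvTable (H W : Int) (g : Int → Int → Int) : List (List Int) :=
  (PySem.List.pyRange 0 H 1).map (fun br => (PySem.List.pyRange 0 W 1).map (fun bc => g br bc))

theorem pvTable_congr (H W : Int) (g₁ g₂ : Int → Int → Int)
    (h : ∀ br bc, g₁ br bc = g₂ br bc) : pvTable H W g₁ = pvTable H W g₂ := by
  unfold pvTable
  exact List.map_congr_left (fun br _ => List.map_congr_left (fun bc _ => h br bc))

-- One B update step turns table g into table (g + this cell's contribution).
theorem pv_step (board shape : List (List Int)) (H W r c : Int) (g : Int → Int → Int) :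
    ((PySem.List.pyRange 0 H 1).map (fun br =>
      (PySem.List.pyRange 0 W 1).map (fun bc =>
        PySem.List.pyGetD (PySem.List.pyGetD (pvTable H W g) br []) bc 0
          + PySem.List.pyGetD (PySem.List.pyGetD board (br + r) []) (bc + c) 0
            * PySem.List.pyGetD (PySem.List.pyGetD shape r []) c 0)))
    = pvTable H W (fun br bc => g br bc
        + PySem.List.pyGetD (PySem.List.pyGetD board (br + r) []) (bc + c) 0
          * PySem.List.pyGetD (PySem.List.pyGetD shape r []) c 0) := by
  unfold pvTable
  refine List.map_congr_left ?_
  intro br hbr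
  rw [PySem.List.mem_pyRange_one] at hbr
  refine List.map_congr_left ?_
  intro bc hbc
  rw [PySem.List.mem_pyRange_one] at hbc
  rw [PySem.List.pyGetD_map_pyRange_of_nonneg _ H br _ hbr.1 hbr.2,
    PySem.List.pyGetD_map_pyRange_of_nonneg _ W bc _ hbc.1 hbc.2]

-- Folding B's update over any list of columns accumulates the row-r contributions.
theorem pv_fold_c (board shape : List (List Int)) (H W r : Int) :
    ∀ (cs : List Int) (g : Int → Int → Int),
      cs.foldl (fun score c =>
        (PySem.List.pyRange 0 H 1).map (fun br =>
          (PySem.List.pyRange 0 W 1).map (fun bc =>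
            PySem.List.pyGetD (PySem.List.pyGetD score br []) bc 0
              + PySem.List.pyGetD (PySem.List.pyGetD board (br + r) []) (bc + c) 0
                * PySem.List.pyGetD (PySem.List.pyGetD shape r []) c 0))) (pvTable H W g)
      = pvTable H W (fun br bc => g br bc + ((cs.map (fun c =>
          PySem.List.pyGetD (PySem.List.pyGetD board (br + r) []) (bc + c) 0
            * PySem.List.pyGetD (PySem.List.pyGetD shape r []) c 0)).sum)) := by
  intro cs
  induction cs with
  | nil => intro g; simp [pvTable]
  | cons c cs ih =>
    intro g
    rw [List.foldl_cons, pv_step board shape H W r c g, ih]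
    exact pvTable_congr _ _ _ _ (fun br bc => by simp [add_assoc])

-- Folding over any list of rows accumulates the full contributions.
theorem pv_fold_r (board shape : List (List Int)) (H W C : Int) :
    ∀ (rs : List Int) (g : Int → Int → Int),
      rs.foldl (fun score r =>
        (PySem.List.pyRange 0 C 1).foldl (fun score c =>
          (PySem.List.pyRange 0 H 1).map (fun br =>
            (PySem.List.pyRange 0 W 1).map (fun bc =>
              PySem.List.pyGetD (PySem.List.pyGetD score br []) bc 0
                + PySem.List.pyGetD (PySem.List.pyGetD board (br + r) []) (bc + c) 0
                  * PySem.List.pyGetD (PySem.List.pyGetD shape r []) c 0))) score) (pvTable H W g)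
      = pvTable H W (fun br bc => g br bc + (rs.map (fun r =>
          ((PySem.List.pyRange 0 C 1).map (fun c =>
            PySem.List.pyGetD (PySem.List.pyGetD board (br + r) []) (bc + c) 0
              * PySem.List.pyGetD (PySem.List.pyGetD shape r []) c 0)).sum)).sum) := by
  intro rs
  induction rs with
  | nil => intro g; simp [pvTable]
  | cons r rs ih =>
    intro g
    rw [List.foldl_cons, pv_fold_c board shape H W r _ g, ih]
    exact pvTable_congr _ _ _ _ (fun br bc => by simp [add_assoc])

-- Running max with a combined accumulator splits.
theorem pv_foldl_max_acc (l : List Int) : ∀ (a b : Int),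
    l.foldl max (max a b) = max a (l.foldl max b) := by
  induction l with
  | nil => intro a b; rfl
  | cons c l ih =>
    intro a b
    simp only [List.foldl_cons, max_assoc, ih]

-- ===== VERDICT =====
theorem match_tetromino_spec : Claim_equal_match_tetromino := by
  unfold Claim_equal_match_tetromino
  intro board shape _ hPre
  obtain ⟨hb, hs, _⟩ := hPre
  unfold Spec_match_tetromino match_tetromino match_tetromino_alt
  dsimp only
  set N : Int := (board.length : Int) with hN
  set M : Int := ((PySem.List.pyGetD board 0 ([] : List Int)).length : Int) with hM
  set R : Int := (shape.length : Int) with hR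
  set C : Int := ((PySem.List.pyGetD shape 0 ([] : List Int)).length : Int) with hC
  -- the per-placement score, shared by both sides
  set t : Int → Int → Int := fun br bc =>
    ((PySem.List.pyRange 0 R 1).map (fun r =>
      ((PySem.List.pyRange 0 C 1).map (fun c =>
        PySem.List.pyGetD (PySem.List.pyGetD board (br + r) []) (bc + c) 0
          * PySem.List.pyGetD (PySem.List.pyGetD shape r []) c 0)).sum)).sum with ht
  by_cases hNR : N < R
  · rw [if_pos hNR, if_pos (by simp; omega)]
  · rw [if_neg hNR]
    by_cases hW : M - C + 1 ≤ 0
    · rw [if_pos (by simp; omega)]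
      rw [PySem.List.pyRange_one_eq_nil (a := 0) (b := M - C + 1) hW]
      simp only [List.foldl_nil, PySem.List.foldl_ignore]
    · rw [if_neg (by simp; omega)]
      -- A's side: rewrite the inner double loop into the sum t br bc
      have hA : ∀ (s : Int),
          (PySem.List.pyRange 0 (N - R + 1) 1).foldl (fun summation br =>
            (PySem.List.pyRange 0 (M - C + 1) 1).foldl (fun summation bc =>
              max summation ((PySem.List.pyRange 0 R 1).foldl (fun temp r =>
                (PySem.List.pyRange 0 C 1).foldl (fun temp c =>
                  temp + PySem.List.pyGetD (PySem.List.pyGetD board (br + r) []) (bc + c) 0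
                       * PySem.List.pyGetD (PySem.List.pyGetD shape r []) c 0) temp) 0)) summation) s
          = (PySem.List.pyRange 0 (N - R + 1) 1).foldl (fun summation br =>
              (PySem.List.pyRange 0 (M - C + 1) 1).foldl (fun summation bc =>
                max summation (t br bc)) summation) s := by
        intro s
        apply PySem.List.foldl_congr_mem
        intro acc br _
        apply PySem.List.foldl_congr_mem
        intro acc2 bc _
        congr 1
        rw [ht]
        dsimp only
        have hinner : (PySem.List.pyRange 0 R 1).foldl (fun temp r =>
              (PySem.List.pyRange 0 C 1).foldl (fun temp c =>
                temp + PySem.List.pyGetD (PySem.List.pyGetD board (br + r) []) (bc + c) 0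
                     * PySem.List.pyGetD (PySem.List.pyGetD shape r []) c 0) temp) 0
            = (PySem.List.pyRange 0 R 1).foldl (fun temp r =>
                temp + ((PySem.List.pyRange 0 C 1).map (fun c =>
                  PySem.List.pyGetD (PySem.List.pyGetD board (br + r) []) (bc + c) 0
                    * PySem.List.pyGetD (PySem.List.pyGetD shape r []) c 0)).sum) 0 := by
          apply PySem.List.foldl_congr_mem
          intro temp r _
          exact PySem.List.foldl_add _ _ _
        rw [hinner, PySem.List.foldl_add]
        simp
      rw [hA]
      -- B's side: the initial table is pvTable of the zero function
      have h0 : (PySem.List.pyRange 0 (N - R + 1) 1).map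
            (fun _ => List.replicate (M - C + 1).toNat (0 : Int))
          = pvTable (N - R + 1) (M - C + 1) (fun _ _ => 0) := by
        unfold pvTable
        refine List.map_congr_left (fun br _ => ?_)
        rw [List.map_const', PySem.List.length_pyRange_one]
        norm_num
      rw [h0, pv_fold_r board shape (N - R + 1) (M - C + 1) C _ (fun _ _ => 0),
        pvTable_congr _ _ _ t (fun br bc => by rw [ht]; simp)]
      -- both sides are now max-reductions of the same table t
      have hHpos : (0 : Int) < N - R + 1 := by omega
      have hWpos : (0 : Int) < M - C + 1 := by omega
      -- characterise one row's reduction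
      have hrow : ∀ (br s : Int),
          (PySem.List.pyRange 0 (M - C + 1) 1).foldl (fun acc bc => max acc (t br bc)) s
          = max s ((PySem.List.max? ((PySem.List.pyRange 0 (M - C + 1) 1).map (t br))
              (fun x => x)).getD 0) := by
        intro br s
        rw [← List.foldl_map (f := t br) (g := max)]
        rw [PySem.List.pyRange_one_cons hWpos, List.map_cons, PySem.List.max?_id_cons]
        simp only [List.foldl_cons, Option.getD_some]
        exact pv_foldl_max_acc _ s (t br 0)
      -- outer reduction on A's side
      have houter :
          (PySem.List.pyRange 0 (N - R + 1) 1).foldl (fun summation br =>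
            (PySem.List.pyRange 0 (M - C + 1) 1).foldl (fun summation bc =>
              max summation (t br bc)) summation) 0
          = (PySem.List.pyRange 0 (N - R + 1) 1).foldl (fun acc br =>
              max acc ((PySem.List.max? ((PySem.List.pyRange 0 (M - C + 1) 1).map (t br))
                (fun x => x)).getD 0)) 0 := by
        apply PySem.List.foldl_congr_mem
        intro acc br _
        exact hrow br acc
      rw [houter]
      -- B's row-max list is the map of row maxima over the row range
      unfold pvTable
      rw [List.map_map]
      have hmaps : ((PySem.List.pyRange 0 (N - R + 1) 1).map
            ((fun row => (PySem.List.max? row (fun x => x)).getD 0) ∘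
              (fun br => (PySem.List.pyRange 0 (M - C + 1) 1).map (fun bc => t br bc))))
          = (PySem.List.pyRange 0 (N - R + 1) 1).map (fun br =>
              (PySem.List.max? ((PySem.List.pyRange 0 (M - C + 1) 1).map (t br))
                (fun x => x)).getD 0) := rfl
      rw [hmaps]
      set Mrow : Int → Int := fun br =>
        (PySem.List.max? ((PySem.List.pyRange 0 (M - C + 1) 1).map (t br)) (fun x => x)).getD 0
        with hMrow
      rw [← List.foldl_map (f := Mrow) (g := max),
        PySem.List.pyRange_one_cons hHpos, List.map_cons, PySem.List.max?_id_cons]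
      simp only [List.foldl_cons, Option.getD_some]
      exact pv_foldl_max_acc _ 0 (Mrow 0)
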